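-- pv_equiv track=rewrite | github.com/wangzitian0/finance_report | scripts/coverage_analyzer.py | identify_common_patterns
-- ===== SOURCE A (Python) =====
-- from typing import Dict, List, Tuple
--
-- def identify_common_patterns(missing_lines: List[str]) -> Dict[str, int]:
--     """Identify common coverage gap patterns."""
--     patterns = {
--         "exception_handling": 0,
--         "edge_cases": 0,
--         "error_paths": 0,
--         "async_paths": 0,
--         "optional_params": 0,
--     }
--
--     for line in missing_lines:
--         if "except" in line:
--             patterns["exception_handling"] += 1
--         if "if" in line and "else" in line:
--             patterns["edge_cases"] += 1
--         if "raise" in line or "error" in line: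
--             patterns["error_paths"] += 1
--         if "async" in line:
--             patterns["async_paths"] += 1
--         if "=" in line and "default" in line:
--             patterns["optional_params"] += 1
--
--     return patterns
-- ===== SOURCE B (Python) =====
-- def identify_common_patterns(missing_lines):
--     """Identify common coverage gap patterns."""
--     return {
--         "exception_handling": sum(1 for line in missing_lines if "except" in line),
--         "edge_cases": sum(1 for line in missing_lines if "if" in line and "else" in line),
--         "error_paths": sum(1 for line in missing_lines if "raise" in line or "error" in line),
--         "async_paths": sum(1 for line in missing_lines if "async" in line),
--         "optional_params": sum(1 for line in missing_lines if "=" in line and "default" in line),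
--     }
-- ===== Notes on version B (the rewrite author's own statement) =====
-- stated objective: simpler
-- what changed: Replaces the single fused loop over five mutable counters with five independent one-liner counts (sum of a generator per pattern) assembled directly into the dict literal.
import Mathlib
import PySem

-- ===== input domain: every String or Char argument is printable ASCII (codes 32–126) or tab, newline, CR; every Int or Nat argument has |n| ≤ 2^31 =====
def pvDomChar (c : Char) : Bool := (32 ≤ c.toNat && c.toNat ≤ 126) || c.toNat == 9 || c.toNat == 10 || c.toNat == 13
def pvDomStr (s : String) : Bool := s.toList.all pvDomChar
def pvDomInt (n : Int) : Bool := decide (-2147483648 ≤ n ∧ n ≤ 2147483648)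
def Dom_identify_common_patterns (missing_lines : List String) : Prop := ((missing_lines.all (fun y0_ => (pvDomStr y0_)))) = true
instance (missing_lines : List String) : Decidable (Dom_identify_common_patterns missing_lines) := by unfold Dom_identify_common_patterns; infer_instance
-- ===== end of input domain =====

-- B replaces A's single fused loop over five mutable counters with five independent
-- per-pattern counts assembled directly into the dict (objective: simpler).


-- ===== PORT A =====
-- A: one pass, five counters updated in lockstep (the dict's values), keys fixed up front.
def identify_common_patterns_step (p : Int × Int × Int × Int × Int) (line : String) :
    Int × Int × Int × Int × Int :=
  let (a, b, c, d, e) := p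
  let a := if PySem.Str.isIn "except" line then a + 1 else a
  let b := if PySem.Str.isIn "if" line && PySem.Str.isIn "else" line then b + 1 else b
  let c := if PySem.Str.isIn "raise" line || PySem.Str.isIn "error" line then c + 1 else c
  let d := if PySem.Str.isIn "async" line then d + 1 else d
  let e := if PySem.Str.isIn "=" line && PySem.Str.isIn "default" line then e + 1 else e
  (a, b, c, d, e)

def identify_common_patterns (missing_lines : List String) : List (String × Int) :=
  let patterns := missing_lines.foldl identify_common_patterns_step (0, 0, 0, 0, 0)
  [("exception_handling", patterns.1), ("edge_cases", patterns.2.1),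
   ("error_paths", patterns.2.2.1), ("async_paths", patterns.2.2.2.1),
   ("optional_params", patterns.2.2.2.2)]

-- ===== PORT B =====
-- B: five independent counts, one per pattern (sum(1 for line in … if cond) = countP).
def identify_common_patterns_alt (missing_lines : List String) : List (String × Int) :=
  [("exception_handling", (missing_lines.countP (fun line => PySem.Str.isIn "except" line) : Int)),
   ("edge_cases", (missing_lines.countP (fun line => PySem.Str.isIn "if" line && PySem.Str.isIn "else" line) : Int)),
   ("error_paths", (missing_lines.countP (fun line => PySem.Str.isIn "raise" line || PySem.Str.isIn "error" line) : Int)),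
   ("async_paths", (missing_lines.countP (fun line => PySem.Str.isIn "async" line) : Int)),
   ("optional_params", (missing_lines.countP (fun line => PySem.Str.isIn "=" line && PySem.Str.isIn "default" line) : Int))]

-- ===== PRECONDITION & SPEC =====
def Spec_identify_common_patterns (missing_lines : List String) (out : List (String × Int)) : Prop := out = identify_common_patterns_alt missing_lines
instance (missing_lines : List String) (out : List (String × Int)) : Decidable (Spec_identify_common_patterns missing_lines out) := by unfold Spec_identify_common_patterns; infer_instance

-- ===== CLAIM (what is proved, stated in full; the proofs are below) =====
def Claim_equal_identify_common_patterns : Prop := ∀ (missing_lines : List String), Dom_identify_common_patterns missing_lines → Spec_identify_common_patterns missing_lines (identify_common_patterns missing_lines)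

-- ===== LEMMAS AND PROOFS =====

-- Loop invariant: A's fold adds the five per-pattern counts componentwise.
theorem foldA_eq_counts (missing_lines : List String) (a b c d e : Int) :
    missing_lines.foldl identify_common_patterns_step (a, b, c, d, e)
    = (a + (missing_lines.countP (fun line => PySem.Str.isIn "except" line) : Int),
       b + (missing_lines.countP (fun line => PySem.Str.isIn "if" line && PySem.Str.isIn "else" line) : Int),
       c + (missing_lines.countP (fun line => PySem.Str.isIn "raise" line || PySem.Str.isIn "error" line) : Int),
       d + (missing_lines.countP (fun line => PySem.Str.isIn "async" line) : Int),
       e + (missing_lines.countP (fun line => PySem.Str.isIn "=" line && PySem.Str.isIn "default" line) : Int)) := by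
  induction missing_lines generalizing a b c d e with
  | nil => simp
  | cons hd tl ih =>
    simp only [List.foldl_cons, List.countP_cons, identify_common_patterns_step]
    rw [ih]
    split_ifs <;> simp only [Prod.mk.injEq] <;> push_cast <;> omega

-- ===== VERDICT (by name: the statement is the Claim_ definition above) =====
theorem identify_common_patterns_spec : Claim_equal_identify_common_patterns := by
  intro missing_lines _
  show _ = _
  simp [identify_common_patterns, identify_common_patterns_alt, foldA_eq_counts]
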